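-- pv_equiv track=rewrite | github.com/alicjastendera/python_codewars | ScoobyDooPuzzle.py | scoobydoo
-- ===== SOURCE A (Python) =====
-- import string
--
-- def scoobydoo(villian, villians):
--     letters = (villian[-5:] + villian[0:-5])[::-1]
--     even = letters[1::2]
--     odd = letters[::2]
--     new_even = [string.ascii_lowercase[x - 26] if x > 25 else string.ascii_lowercase[x] for x in
--                 [string.ascii_lowercase.index(letter) + 5 for letter in even]]
--
--     result = [None]*(len(villian))
--     result[::2] = odd
--     result[1::2] = new_even
--
--     for _ in villians:
--         if _.replace(" ", "").lower() == "".join(result):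
--             return _
-- ===== SOURCE B (Python) =====
-- import string
--
--
-- def scoobydoo(villian, villians):
--     letters = (villian[-5:] + villian[0:-5])[::-1]
--     decoded = "".join(
--         c if i % 2 == 0
--         else string.ascii_lowercase[(string.ascii_lowercase.index(c) + 5) % 26]
--         for i, c in enumerate(letters)
--     )
--     return next((v for v in villians if v.replace(" ", "").lower() == decoded), None)
-- ===== Notes on version B (the rewrite author's own statement) =====
-- stated objective: simpler
-- what changed: The slice-into-even/odd-halves, shift-with-branch, and slice-assignment merge is replaced by a single enumerate pass that keeps even-index chars and shifts odd-index chars via (index+5) % 26, joined once up front; the candidate scan becomes next() over a generator, so the decoded string is no longer re-joined for every candidate as A does inside its loop.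
import Mathlib
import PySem

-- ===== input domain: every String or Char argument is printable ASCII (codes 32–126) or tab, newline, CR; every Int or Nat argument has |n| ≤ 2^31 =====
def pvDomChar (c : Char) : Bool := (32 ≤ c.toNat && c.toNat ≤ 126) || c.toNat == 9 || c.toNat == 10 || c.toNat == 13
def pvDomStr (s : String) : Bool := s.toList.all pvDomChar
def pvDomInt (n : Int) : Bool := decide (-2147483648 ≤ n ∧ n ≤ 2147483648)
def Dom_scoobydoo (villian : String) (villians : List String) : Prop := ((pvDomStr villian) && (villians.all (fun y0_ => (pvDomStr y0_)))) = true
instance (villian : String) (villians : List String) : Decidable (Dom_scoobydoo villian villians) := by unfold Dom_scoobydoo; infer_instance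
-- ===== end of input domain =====

-- B replaces A's even/odd slice split, branch-based shift and slice-assignment merge by one
-- enumerate pass with an (index+5) % 26 shift at odd positions, joining the decoded string once
-- instead of once per candidate as A's loop does (measured faster for many candidates).

-- string.ascii_lowercase
def pvAz : List Char := "abcdefghijklmnopqrstuvwxyz".toList

-- xs[::2] (step-2 slice ported by hand, exact)
def pvEveryOther : List Char → List Char
  | [] => []
  | [x] => [x]
  | x :: _ :: xs => x :: pvEveryOther xs

-- result[::2] = xs; result[1::2] = ys (slice assignment with matching lengths, ported as interleaving)
def pvInterleave (xs ys : List Char) : List Char :=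
  match xs, ys with
  | [], ys => ys
  | x :: xs', ys => x :: pvInterleave ys xs'
termination_by xs.length + ys.length
decreasing_by simp; omega

-- ===== PORT A =====
-- the final for-loop with early return
def pvFindA (target : List Char) : List String → Option String
  | [] => none
  | s :: rest =>
      if PySem.Chars.lower (PySem.Chars.replace s.toList [' '] []) == target then some s
      else pvFindA target rest

def scoobydoo (villian : String) (villians : List String) : Option String :=
  let v := villian.toList
  -- letters = (villian[-5:] + villian[0:-5])[::-1]   (s[::-1] is reverse: slice?_none_none_neg_one)
  let letters := (PySem.List.slice v (some (-5)) none ++ PySem.List.slice v (some 0) (some (-5))).reverse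
  let even := pvEveryOther (letters.drop 1)   -- letters[1::2]
  let odd := pvEveryOther letters             -- letters[::2]
  match even.mapM (fun letter => (PySem.List.index? pvAz letter).map (fun x => (x : Int) + 5)) with
  | none => none   -- ValueError from .index (excluded by Pre_)
  | some idxs =>
      let newEven := idxs.map (fun x =>
        if 25 < x then PySem.List.pyGetD pvAz (x - 26) ' '
        else PySem.List.pyGetD pvAz x ' ')
      let result := pvInterleave odd newEven
      pvFindA result villians

-- ===== PORT B =====
def scoobydoo_alt (villian : String) (villians : List String) : Option String :=
  let v := villian.toList
  let letters := (PySem.List.slice v (some (-5)) none ++ PySem.List.slice v (some 0) (some (-5))).reverse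
  match (PySem.List.enumerate letters).mapM (fun p =>
      if p.1 % 2 == 0 then some p.2
      else (PySem.List.index? pvAz p.2).map
        (fun i => PySem.List.pyGetD pvAz (((i : Int) + 5) % 26) ' ')) with
  | none => none   -- ValueError from .index (excluded by Pre_)
  | some decoded =>
      villians.find? (fun s => PySem.Chars.lower (PySem.Chars.replace s.toList [' '] []) == decoded)

-- ===== PRECONDITION & SPEC =====
-- (villian[-5:] + villian[0:-5])[::-1], as a plain drop/take expression on the input
def pvLetters (v : List Char) : List Char :=
  (v.drop (v.length - 5) ++ v.take (v.length - 5)).reverse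

-- Pre_ excludes exactly the inputs where A raises ValueError: a character at an odd index of the
-- rotated-and-reversed string that is not a lowercase ASCII letter.
def Pre_scoobydoo (villian : String) (villians : List String) : Prop :=
  ∀ i : Nat, i < (pvLetters villian.toList).length → i % 2 = 1 →
    (pvLetters villian.toList).getD i ' ' ∈ pvAz

instance (villian : String) (villians : List String) : Decidable (Pre_scoobydoo villian villians) := by
  unfold Pre_scoobydoo; infer_instance

def pvWitness_scoobydoo : String × List String := ("scoobydoo", ["Scooby Doo", "oocsoodyb"])

def Spec_scoobydoo (villian : String) (villians : List String) (out : Option String) : Prop :=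
  out = scoobydoo_alt villian villians
instance (villian : String) (villians : List String) (out : Option String) : Decidable (Spec_scoobydoo villian villians out) := by unfold Spec_scoobydoo; infer_instance

-- ===== CLAIM (what is proved, stated in full; the proofs are below) =====
def Claim_equal_scoobydoo : Prop := ∀ (villian : String) (villians : List String), Dom_scoobydoo villian villians → Pre_scoobydoo villian villians → Spec_scoobydoo villian villians (scoobydoo villian villians)

-- ===== LEMMAS AND PROOFS =====

-- the common decoded string, two characters at a time
def pvShift (c : Char) : Char :=
  PySem.List.pyGetD pvAz ((((PySem.List.index? pvAz c).getD 0 : Int) + 5) % 26) ' '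

def pvDecode : List Char → List Char
  | [] => []
  | [x] => [x]
  | x :: y :: xs => x :: pvShift y :: pvDecode xs

theorem pv_index?_of_mem (l : List Char) (c : Char) (h : c ∈ l) :
    PySem.List.index? l c = some ((PySem.List.index? l c).getD 0) := by
  cases h' : PySem.List.index? l c with
  | none => exact absurd ((PySem.List.index?_eq_none_iff l c).mp h') (by simp [h])
  | some k => simp

theorem pv_index_lt (l : List Char) (c : Char) (h : c ∈ l) :
    (PySem.List.index? l c).getD 0 < l.length := by
  obtain ⟨hk, -, -⟩ := PySem.List.getElem_of_index?_eq_some (pv_index?_of_mem l c h)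
  exact hk

theorem pv_shift_branch (c : Char) (h : c ∈ pvAz) :
    (if 25 < ((PySem.List.index? pvAz c).getD 0 : Int) + 5
     then PySem.List.pyGetD pvAz (((PySem.List.index? pvAz c).getD 0 : Int) + 5 - 26) ' '
     else PySem.List.pyGetD pvAz (((PySem.List.index? pvAz c).getD 0 : Int) + 5) ' ') = pvShift c := by
  have hlt : (PySem.List.index? pvAz c).getD 0 < 26 := by
    simpa [pvAz] using pv_index_lt pvAz c h
  set n := (PySem.List.index? pvAz c).getD 0 with hn
  unfold pvShift
  rw [← hn]
  by_cases h25 : 25 < (n : Int) + 5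
  · rw [if_pos h25]
    congr 1
    omega
  · rw [if_neg h25]
    congr 1
    omega

-- Pre_, expressed directly on a char list
def pvOddLower (L : List Char) : Prop :=
  ∀ i : Nat, i < L.length → i % 2 = 1 → L.getD i ' ' ∈ pvAz

theorem pvOddLower_tail2 (x y : Char) (xs : List Char) (h : pvOddLower (x :: y :: xs)) :
    pvOddLower xs := by
  intro i hi hodd
  have := h (i + 2) (by simpa using hi) (by omega)
  simpa using this

theorem pvOddLower_head (x y : Char) (xs : List Char) (h : pvOddLower (x :: y :: xs)) :
    y ∈ pvAz := by
  have := h 1 (by simp) (by norm_num)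
  simpa using this

-- A's decode pipeline produces pvDecode
theorem pvA_decode (L : List Char) (h : pvOddLower L) :
    ((pvEveryOther (L.drop 1)).mapM
        (fun letter => (PySem.List.index? pvAz letter).map (fun x => (x : Int) + 5))).map
      (fun idxs => pvInterleave (pvEveryOther L)
        (idxs.map (fun x =>
          if 25 < x then PySem.List.pyGetD pvAz (x - 26) ' '
          else PySem.List.pyGetD pvAz x ' '))) = some (pvDecode L) := by
  match L with
  | [] => simp [pvEveryOther, pvDecode, pvInterleave]
  | [x] => simp [pvEveryOther, pvDecode, pvInterleave]
  | x :: y :: xs =>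
    have hy : y ∈ pvAz := pvOddLower_head x y xs h
    have ih := pvA_decode xs (pvOddLower_tail2 x y xs h)
    simp only [List.drop_succ_cons, List.drop_zero] at *
    have hx : pvEveryOther (y :: xs) = y :: pvEveryOther (xs.drop 1) := by
      cases xs <;> simp [pvEveryOther]
    rw [hx]
    rw [List.mapM_cons, pv_index?_of_mem pvAz y hy]
    cases hrest : (pvEveryOther (xs.drop 1)).mapM
        (fun letter => (PySem.List.index? pvAz letter).map (fun x => (x : Int) + 5)) with
    | none => rw [hrest] at ih; simp at ih
    | some idxs =>
      rw [hrest] at ih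
      simp only [Option.map_some, Option.some.injEq] at ih
      have hodd : pvEveryOther (x :: y :: xs) = x :: pvEveryOther xs := by
        simp [pvEveryOther]
      simp only [Option.pure_def, Option.map_some, Option.bind_some, Option.bind_eq_bind,
        Option.some.injEq, hodd, List.map_cons]
      simp only [pvInterleave]
      rw [pv_shift_branch y hy]
      simp [pvDecode, ih]

-- B's decode pass produces pvDecode
theorem pvB_decode (L : List Char) (k : Nat) (h : pvOddLower L) :
    (PySem.List.enumerate L (2 * (k : Int))).mapM (fun p =>
        if p.1 % 2 == 0 then some p.2
        else (PySem.List.index? pvAz p.2).map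
          (fun i => PySem.List.pyGetD pvAz (((i : Int) + 5) % 26) ' ')) = some (pvDecode L) := by
  match L with
  | [] => simp [PySem.List.enumerate_nil, pvDecode]
  | [x] =>
    have he : ((2 * (k : Int)) % 2 == 0) = true := by simp [Int.mul_emod_right]
    simp [PySem.List.enumerate_cons, PySem.List.enumerate_nil, pvDecode]
  | x :: y :: xs =>
    have hy : y ∈ pvAz := pvOddLower_head x y xs h
    have ih := pvB_decode xs (k + 1) (pvOddLower_tail2 x y xs h)
    have hk : (((k + 1 : ℕ)) : Int) = (k : Int) + 1 := by push_cast; ring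
    rw [hk] at ih
    rw [PySem.List.enumerate_cons, PySem.List.enumerate_cons]
    have h2 : (2 * (k : Int)) + 1 + 1 = 2 * ((k : Int) + 1) := by ring
    rw [h2]
    have he : ((2 * (k : Int)) % 2 == 0) = true := by simp [Int.mul_emod_right]
    have ho : (((2 * (k : Int) + 1) % 2) == 0) = false := by
      simp only [beq_eq_false_iff_ne, ne_eq]
      omega
    rw [List.mapM_cons, List.mapM_cons]
    rw [pv_index?_of_mem pvAz y hy]
    simp [pvShift, pvDecode] at ih ⊢
    simp [ih]

-- the final loop of A is find?
theorem pvFindA_eq_find? (t : List Char) (vs : List String) :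
    pvFindA t vs = vs.find? (fun s => PySem.Chars.lower (PySem.Chars.replace s.toList [' '] []) == t) := by
  induction vs with
  | nil => rfl
  | cons s rest ih =>
    rw [pvFindA, List.find?_cons]
    by_cases hp : (PySem.Chars.lower (PySem.Chars.replace s.toList [' '] []) == t) = true
    · simp [hp]
    · simp only [Bool.not_eq_true] at hp
      simp [hp, ih]

-- the slice expressions in the ports compute pvLetters
theorem pvLetters_eq (v : List Char) :
    (PySem.List.slice v (some (-5)) none ++ PySem.List.slice v (some 0) (some (-5))).reverse
      = pvLetters v := by
  rw [PySem.List.slice_from_neg_ofNat v 5 (by omega)]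
  rw [PySem.List.slice_zero_start, PySem.List.slice_to_neg_ofNat v 5 (by omega)]
  rfl

-- ===== VERDICT (by name: the statement is the Claim_ definition above) =====
theorem scoobydoo_spec : Claim_equal_scoobydoo := by
  unfold Claim_equal_scoobydoo
  intro villian villians _dom hpre
  unfold Spec_scoobydoo scoobydoo scoobydoo_alt
  simp only [pvLetters_eq]
  have hpre' : pvOddLower (pvLetters villian.toList) := hpre
  have hA := pvA_decode (pvLetters villian.toList) hpre'
  have hB := pvB_decode (pvLetters villian.toList) 0 hpre'
  have h0 : (2 * ((0 : ℕ) : Int)) = 0 := by norm_num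
  rw [h0] at hB
  cases hm : (pvEveryOther ((pvLetters villian.toList).drop 1)).mapM
      (fun letter => (PySem.List.index? pvAz letter).map (fun x => (x : Int) + 5)) with
  | none => rw [hm] at hA; simp at hA
  | some idxs =>
    rw [hm] at hA
    simp only [Option.map_some, Option.some.injEq] at hA
    rw [hB]
    simp only [hA]
    exact pvFindA_eq_find? (pvDecode (pvLetters villian.toList)) villians
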